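-- pv_equiv track=rewrite | github.com/PicsArt/cppbind | src/cppbind/converter/kotlin.py | get_jni_func_name
-- ===== SOURCE A (Python) =====
-- def get_jni_func_name(package_name, class_name, method_name, args_type_name=None):
--     def fix_name(name):
--         for s, r in [('_', '_1'), ('.', '_'), (';', '_2'), ('[', '_3')]:
--             name = name.replace(s, r)
--         return name
--
--     args_type_signature = dict(
--         jboolean='Z',
--         jbyte='B',
--         jchar='C',
--         jshort='S',
--         jint='I',
--         jlong='J',
--         jfloat='F',
--         jdouble='D',
--         jobject='Ljava_lang_Object_2',
--         jstring='Ljava_lang_String_2',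
--     )
--     package_name = fix_name(package_name)
--     # consider nested types as well
--     class_name = '_00024'.join([fix_name(t) for t in class_name.split('.')])
--     method_name = fix_name(method_name)
--     if args_type_name is None or any((a not in args_type_signature for a in args_type_name)):
--         return f'Java_{package_name}_{class_name}_{method_name}'
--     return f'Java_{package_name}_{class_name}_{method_name}__\
-- {"".join([args_type_signature[arg] for arg in args_type_name])}'
-- ===== SOURCE B (Python) =====
-- _SIG = {
--     'jboolean': 'Z', 'jbyte': 'B', 'jchar': 'C', 'jshort': 'S', 'jint': 'I',
--     'jlong': 'J', 'jfloat': 'F', 'jdouble': 'D',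
--     'jobject': 'Ljava_lang_Object_2', 'jstring': 'Ljava_lang_String_2',
-- }
--
-- # '\x00' separates the three parts, '\x01' marks a nested-class dot; both are
-- # control characters that cannot occur in the (printable-ASCII) inputs.
-- _MAP = {'\x00': '_', '\x01': '_00024', '_': '_1', '.': '_', ';': '_2', '[': '_3'}
--
--
-- def get_jni_func_name(package_name, class_name, method_name, args_type_name=None):
--     fused = package_name + '\x00' + class_name.replace('.', '\x01') + '\x00' + method_name
--     base = 'Java_' + ''.join(_MAP.get(c, c) for c in fused)
--     if args_type_name is None:
--         return base
--     suffix = '__'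
--     for a in args_type_name:
--         code = _SIG.get(a)
--         if code is None:
--             return base
--         suffix += code
--     return base + suffix
-- ===== Notes on version B (the rewrite author's own statement) =====
-- stated objective: alternative
-- what changed: B fuses package, class and method into one control-character-separated string ('\x00' part separator, '\x01' nested-class dot, impossible in the printable-ASCII domain) and emits the whole mangled base in a single scan with one output table, eliminating A's per-part fix_name replace passes, the class split and the join of mangled tokens; the args any()-membership-test-plus-comprehension double pass becomes one loop that builds the '__' suffix directly and returns early on an unknown arg.
import Mathlib
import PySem

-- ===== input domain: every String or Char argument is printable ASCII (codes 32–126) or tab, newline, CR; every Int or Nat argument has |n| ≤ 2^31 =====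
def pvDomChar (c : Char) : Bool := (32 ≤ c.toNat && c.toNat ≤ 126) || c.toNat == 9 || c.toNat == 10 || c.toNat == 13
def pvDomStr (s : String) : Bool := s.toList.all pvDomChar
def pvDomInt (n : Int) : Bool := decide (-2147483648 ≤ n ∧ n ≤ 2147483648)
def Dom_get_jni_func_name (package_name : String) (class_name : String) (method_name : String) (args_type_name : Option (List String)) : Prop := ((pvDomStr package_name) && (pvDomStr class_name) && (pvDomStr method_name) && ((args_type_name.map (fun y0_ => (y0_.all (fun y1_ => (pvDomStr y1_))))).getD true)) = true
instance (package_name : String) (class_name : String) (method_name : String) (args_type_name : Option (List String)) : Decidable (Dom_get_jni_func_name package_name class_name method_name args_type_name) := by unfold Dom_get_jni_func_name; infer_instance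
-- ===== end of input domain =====

-- B fuses the three name parts into ONE control-character-separated string and emits the
-- whole mangled base in a single scan (the sentinels cannot occur in the printable-ASCII
-- domain), replacing A's per-part fix_name passes and mangled-token join; the args check
-- becomes one suffix-building loop (objective: alternative decomposition; return value only).

-- the JNI type-signature table (the same literal dict in both Pythons)
def jniSig : PySem.Dict String String :=
  ((((((((((PySem.Dict.empty.insert "jboolean" "Z").insert "jbyte" "B").insert "jchar" "C").insert
      "jshort" "S").insert "jint" "I").insert "jlong" "J").insert "jfloat" "F").insert
      "jdouble" "D").insert "jobject" "Ljava_lang_Object_2").insert "jstring" "Ljava_lang_String_2")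

-- ===== PORT A =====
-- fix_name: four sequential replaces, as a fold over the (old, new) pairs
def fixName (name : String) : String :=
  [("_", "_1"), (".", "_"), (";", "_2"), ("[", "_3")].foldl
    (fun n p => PySem.Str.replace n p.1 p.2) name

def get_jni_func_name (package_name : String) (class_name : String) (method_name : String) (args_type_name : Option (List String)) : String :=
  let pn := fixName package_name
  let cn := PySem.Str.join "_00024" ((PySem.Chars.splitOn class_name.toList ['.']).map (fun t => fixName (String.ofList t)))
  let mn := fixName method_name
  match args_type_name with
  | none => "Java_" ++ pn ++ "_" ++ cn ++ "_" ++ mn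
  | some args =>
    if args.any (fun a => !(jniSig.contains a)) then
      "Java_" ++ pn ++ "_" ++ cn ++ "_" ++ mn
    else
      "Java_" ++ pn ++ "_" ++ cn ++ "_" ++ mn ++ "__" ++
        PySem.Str.join "" (args.map (fun a => jniSig.getD a ""))

-- ===== PORT B =====
-- the per-character output table of the single scan ('\x00' = part separator, '\x01' = nested-class dot)
def mapChar (c : Char) : List Char :=
  if c = '\x00' then ['_']
  else if c = '\x01' then ['_', '0', '0', '0', '2', '4']
  else if c = '_' then ['_', '1']
  else if c = '.' then ['_']
  else if c = ';' then ['_', '2']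
  else if c = '[' then ['_', '3']
  else [c]

-- the suffix-building loop: '__' plus all codes, or none (early return) on an unknown arg
def buildSuffix : List String → String → Option String
  | [], acc => some acc
  | a :: rest, acc =>
    match jniSig.get? a with
    | none => none
    | some code => buildSuffix rest (acc ++ code)

def get_jni_func_name_alt (package_name : String) (class_name : String) (method_name : String) (args_type_name : Option (List String)) : String :=
  let fused := package_name.toList ++ '\x00' :: (PySem.Chars.replace class_name.toList ['.'] ['\x01']) ++ '\x00' :: method_name.toList
  let base := "Java_" ++ String.ofList (fused.flatMap mapChar)
  match args_type_name with
  | none => base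
  | some args =>
    match buildSuffix args "__" with
    | none => base
    | some suffix => base ++ suffix

-- ===== PRECONDITION & SPEC =====
def Spec_get_jni_func_name (package_name : String) (class_name : String) (method_name : String) (args_type_name : Option (List String)) (out : String) : Prop := out = get_jni_func_name_alt package_name class_name method_name args_type_name
instance (package_name : String) (class_name : String) (method_name : String) (args_type_name : Option (List String)) (out : String) : Decidable (Spec_get_jni_func_name package_name class_name method_name args_type_name out) := by unfold Spec_get_jni_func_name; infer_instance

-- ===== CLAIM (what is proved, stated in full; the proofs are below) =====
def Claim_equal_get_jni_func_name : Prop := ∀ (package_name : String) (class_name : String) (method_name : String) (args_type_name : Option (List String)), Dom_get_jni_func_name package_name class_name method_name args_type_name → Spec_get_jni_func_name package_name class_name method_name args_type_name (get_jni_func_name package_name class_name method_name args_type_name)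

-- ===== LEMMAS AND PROOFS =====

-- the effect of fix_name on one (non-sentinel) character, used only in the proofs
def mangleChar (c : Char) : List Char :=
  if c = '_' then ['_', '1']
  else if c = '.' then ['_']
  else if c = ';' then ['_', '2']
  else if c = '[' then ['_', '3']
  else [c]

-- replace with a single-character pattern is a flatMap over the characters
theorem replace_go_single (a : Char) (new : List Char) :
    ∀ (l acc : List Char), PySem.Chars.replace.go [a] new l.length l acc =
      acc.reverse ++ l.flatMap (fun c => if c = a then new else [c]) := by
  intro l
  induction l with
  | nil => intro acc; simp [PySem.Chars.replace.go]
  | cons c t ih =>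
    intro acc
    show PySem.Chars.replace.go [a] new (t.length + 1) (c :: t) acc = _
    rw [PySem.Chars.replace.go]
    by_cases h : c = a
    · subst h
      simp only [List.isPrefixOf, beq_self_eq_true, Bool.and_self,
        if_true, List.length_singleton, List.drop_one, List.tail_cons]
      rw [ih]
      simp
    · have hp : [a].isPrefixOf (c :: t) = false := by
        simp [List.isPrefixOf]
        intro hh; exact absurd hh.symm h
      rw [hp]
      simp only [Bool.false_eq_true, if_false]
      rw [ih]
      simp [h]

theorem replace_single (s : List Char) (a : Char) (new : List Char) :
    PySem.Chars.replace s [a] new = s.flatMap (fun c => if c = a then new else [c]) := by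
  rw [PySem.Chars.replace]
  simp [replace_go_single]

theorem flatMap_comp {α β γ : Type} (l : List α) (f : α → List β) (g : β → List γ) :
    (l.flatMap f).flatMap g = l.flatMap (fun x => (f x).flatMap g) := by
  induction l with
  | nil => rfl
  | cons a t ih => simp [ih]

theorem flatMap_congr' {α β : Type} (l : List α) (f g : α → List β) (h : ∀ a, f a = g a) :
    l.flatMap f = l.flatMap g := by
  induction l with
  | nil => rfl
  | cons a t ih => simp [h, ih]

theorem flatMap_congr_mem {α β : Type} (l : List α) (f g : α → List β)
    (h : ∀ a ∈ l, f a = g a) : l.flatMap f = l.flatMap g := by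
  induction l with
  | nil => rfl
  | cons a t ih =>
    simp only [List.flatMap_cons]
    rw [h a (List.mem_cons_self), ih (fun x hx => h x (List.mem_cons_of_mem a hx))]

theorem toList_fixName (s : String) : (fixName s).toList = s.toList.flatMap mangleChar := by
  simp only [fixName, List.foldl, PySem.Str.toList_replace]
  rw [show ("_" : String).toList = ['_'] from rfl, show ("." : String).toList = ['.'] from rfl,
    show (";" : String).toList = [';'] from rfl, show ("[" : String).toList = ['['] from rfl]
  rw [replace_single, replace_single, replace_single, replace_single,
    flatMap_comp, flatMap_comp, flatMap_comp]
  apply flatMap_congr'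
  intro c
  by_cases h1 : c = '_'
  · subst h1; decide
  by_cases h2 : c = '.'
  · subst h2; decide
  by_cases h3 : c = ';'
  · subst h3; decide
  by_cases h4 : c = '['
  · subst h4; decide
  simp [h1, h2, h3, h4, mangleChar]

-- a functional model of splitOn with a single-character separator
def mySplit (a : Char) : List Char → List (List Char)
  | [] => [[]]
  | c :: rest =>
    if c = a then [] :: mySplit a rest
    else
      match mySplit a rest with
      | [] => [[c]]
      | h :: t => (c :: h) :: t

theorem mySplit_ne_nil (a : Char) (l : List Char) : mySplit a l ≠ [] := by
  cases l with
  | nil => simp [mySplit]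
  | cons c rest =>
    simp only [mySplit]
    split_ifs
    · simp
    · cases h : mySplit a rest <;> simp

def prependTok (pre : List Char) : List (List Char) → List (List Char)
  | [] => [pre]
  | h :: t => (pre ++ h) :: t

theorem splitOn_go_single (a : Char) :
    ∀ (fuel : Nat) (l cur : List Char) (acc : List (List Char)), l.length < fuel →
      PySem.Chars.splitOn.go [a] fuel l cur acc =
        acc.reverse ++ prependTok cur.reverse (mySplit a l) := by
  intro fuel
  induction fuel with
  | zero => intro l cur acc h; omega
  | succ f ih =>
    intro l cur acc h
    cases l with
    | nil =>
      rw [PySem.Chars.splitOn.go]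
      simp [mySplit, prependTok]
      omega
    | cons c rest =>
      rw [PySem.Chars.splitOn.go]
      by_cases hc : c = a
      · subst hc
        simp only [List.isPrefixOf, beq_self_eq_true, Bool.and_self, if_true,
          List.length_singleton, List.drop_one, List.tail_cons]
        rw [ih rest [] (cur.reverse :: acc) (by simpa using Nat.lt_of_succ_lt_succ h)]
        simp only [mySplit, if_true, List.reverse_cons, List.reverse_nil]
        cases hr : mySplit c rest with
        | nil => exact absurd hr (mySplit_ne_nil c rest)
        | cons hh tt => simp [prependTok]
      · have hp : [a].isPrefixOf (c :: rest) = false := by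
          simp [List.isPrefixOf]
          intro hh; exact absurd hh.symm hc
        rw [hp]
        simp only [Bool.false_eq_true, if_false]
        rw [ih rest (c :: cur) acc (by simpa using Nat.lt_of_succ_lt_succ h)]
        simp only [mySplit, hc, if_false, List.reverse_cons]
        cases hr : mySplit a rest with
        | nil => exact absurd hr (mySplit_ne_nil a rest)
        | cons hh tt => simp [prependTok]

theorem splitOn_single (a : Char) (l : List Char) :
    PySem.Chars.splitOn l [a] = mySplit a l := by
  rw [PySem.Chars.splitOn, splitOn_go_single a (l.length + 1) l [] [] (by omega)]
  cases hr : mySplit a l with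
  | nil => exact absurd hr (mySplit_ne_nil a l)
  | cons hh tt => simp [prependTok]

theorem join_append_head (m x y : List Char) (ts : List (List Char)) :
    PySem.Chars.join m ((x ++ y) :: ts) = x ++ PySem.Chars.join m (y :: ts) := by
  cases ts with
  | nil => simp [PySem.Chars.join_singleton]
  | cons z zs => simp [PySem.Chars.join_cons_cons]

-- the split-then-mangle-then-join of A equals one flatMap over the raw characters
theorem join_mySplit (a : Char) (m : List Char) (f : Char → List Char) :
    ∀ (l : List Char),
      PySem.Chars.join m ((mySplit a l).map (fun t => t.flatMap f)) =
        l.flatMap (fun c => if c = a then m else f c) := by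
  intro l
  induction l with
  | nil => simp [mySplit, PySem.Chars.join_singleton]
  | cons c rest ih =>
    by_cases hc : c = a
    · subst hc
      simp only [mySplit, if_true, List.map_cons, List.flatMap_nil, List.flatMap_cons]
      cases hr : mySplit c rest with
      | nil => exact absurd hr (mySplit_ne_nil c rest)
      | cons hh tt =>
        rw [hr] at ih
        simp only [List.map_cons] at ih ⊢
        rw [PySem.Chars.join_cons_cons, ih]
        simp
    · simp only [mySplit, hc, if_false, List.flatMap_cons]
      cases hr : mySplit a rest with
      | nil => exact absurd hr (mySplit_ne_nil a rest)
      | cons hh tt =>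
        rw [hr] at ih
        simp only [List.map_cons, List.flatMap_cons] at ih ⊢
        rw [join_append_head m (f c) (hh.flatMap f) (tt.map (fun t => t.flatMap f)), ih]

theorem mapChar_eq_mangleChar (c : Char) (h : pvDomChar c = true) : mapChar c = mangleChar c := by
  have h0 : c ≠ '\x00' := by rintro rfl; simp [pvDomChar] at h
  have h1 : c ≠ '\x01' := by rintro rfl; simp [pvDomChar] at h
  simp [mapChar, mangleChar, h0, h1]

theorem buildSuffix_none_iff (args : List String) (acc : String) :
    buildSuffix args acc = none ↔ (args.any (fun a => !(jniSig.contains a))) = true := by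
  induction args generalizing acc with
  | nil => simp [buildSuffix]
  | cons a rest ih =>
    simp only [buildSuffix, List.any_cons, Bool.or_eq_true]
    cases h : jniSig.get? a with
    | none => simp [PySem.Dict.contains_eq_isSome_get?, h]
    | some code => simp [PySem.Dict.contains_eq_isSome_get?, h, ih]

theorem buildSuffix_some (args : List String) (acc s : String)
    (h : buildSuffix args acc = some s) :
    s.toList = acc.toList ++ args.flatMap (fun a => (jniSig.getD a "").toList) := by
  induction args generalizing acc s with
  | nil => simp only [buildSuffix, Option.some.injEq] at h; subst h; simp
  | cons a rest ih =>
    simp only [buildSuffix] at h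
    cases hg : jniSig.get? a with
    | none => rw [hg] at h; simp at h
    | some code =>
      rw [hg] at h
      rw [ih (acc ++ code) s h]
      simp [String.toList_append, PySem.Dict.getD, hg]

theorem join_empty_sep (ps : List (List Char)) :
    PySem.Chars.join [] ps = ps.flatten := by
  induction ps with
  | nil => simp [PySem.Chars.join_nil]
  | cons h t ih =>
    cases t with
    | nil => simp [PySem.Chars.join_singleton]
    | cons y tt => simp [PySem.Chars.join_cons_cons, ih]

-- the mangled bases agree on the printable-ASCII domain
theorem base_eq (pkg cls mth : String)
    (hp : pkg.toList.all pvDomChar = true) (hc : cls.toList.all pvDomChar = true)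
    (hm : mth.toList.all pvDomChar = true) :
    "Java_" ++ fixName pkg ++ "_" ++
      PySem.Str.join "_00024" ((PySem.Chars.splitOn cls.toList ['.']).map (fun t => fixName (String.ofList t))) ++
      "_" ++ fixName mth
    = "Java_" ++ String.ofList ((pkg.toList ++ '\x00' :: (PySem.Chars.replace cls.toList ['.'] ['\x01']) ++ '\x00' :: mth.toList).flatMap mapChar) := by
  have hP : pkg.toList.flatMap mapChar = pkg.toList.flatMap mangleChar :=
    flatMap_congr_mem _ _ _ (fun c hcm => mapChar_eq_mangleChar c (List.all_eq_true.mp hp c hcm))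
  have hM : mth.toList.flatMap mapChar = mth.toList.flatMap mangleChar :=
    flatMap_congr_mem _ _ _ (fun c hcm => mapChar_eq_mangleChar c (List.all_eq_true.mp hm c hcm))
  have hC : (PySem.Chars.replace cls.toList ['.'] ['\x01']).flatMap mapChar
      = cls.toList.flatMap (fun c => if c = '.' then ['_', '0', '0', '0', '2', '4'] else mangleChar c) := by
    rw [replace_single, flatMap_comp]
    apply flatMap_congr_mem
    intro c hcm
    by_cases hd : c = '.'
    · subst hd; decide
    · simp [hd, mapChar_eq_mangleChar c (List.all_eq_true.mp hc c hcm)]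
  apply String.ext
  show (_ : String).toList = (_ : String).toList
  simp only [String.toList_append, PySem.Str.toList_join, String.toList_ofList, List.map_map,
    toList_fixName, List.flatMap_append, List.flatMap_cons]
  rw [splitOn_single]
  rw [show ("_00024" : String).toList = ['_', '0', '0', '0', '2', '4'] from rfl]
  rw [show (String.toList ∘ fun t => fixName (String.ofList t)) = (fun t : List Char => t.flatMap mangleChar) from funext (fun t => by simp [toList_fixName])]
  rw [join_mySplit '.' ['_', '0', '0', '0', '2', '4'] mangleChar cls.toList]
  rw [hP, hM, hC]
  simp [mapChar]

-- ===== VERDICT (by name: the statement is the Claim_ definition above) =====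
theorem get_jni_func_name_spec : Claim_equal_get_jni_func_name := by
  intro package_name class_name method_name args_type_name hDom
  have hD := hDom
  simp only [Dom_get_jni_func_name, pvDomStr, Bool.and_eq_true] at hD
  obtain ⟨⟨⟨hp, hc⟩, hm⟩, -⟩ := hD
  show get_jni_func_name package_name class_name method_name args_type_name =
    get_jni_func_name_alt package_name class_name method_name args_type_name
  unfold get_jni_func_name get_jni_func_name_alt
  cases args_type_name with
  | none => exact base_eq package_name class_name method_name hp hc hm
  | some args =>
    simp only
    cases hb : buildSuffix args "__" with
    | none =>
      rw [(buildSuffix_none_iff args "__").mp hb]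
      simp only [if_true]
      exact base_eq package_name class_name method_name hp hc hm
    | some s =>
      have hany : (args.any (fun a => !(jniSig.contains a))) = false := by
        cases hh : args.any (fun a => !(jniSig.contains a))
        · rfl
        · exfalso
          have := (buildSuffix_none_iff args "__").mpr hh
          simp [hb] at this
      rw [hany]
      simp only [Bool.false_eq_true, if_false]
      rw [base_eq package_name class_name method_name hp hc hm]
      apply String.ext
      show (_ : String).toList = (_ : String).toList
      simp only [String.toList_append, PySem.Str.toList_join, List.map_map]
      rw [buildSuffix_some args "__" s hb]
      rw [show ("" : String).toList = ([] : List Char) from rfl, join_empty_sep]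
      simp [List.flatMap_def, Function.comp_def]
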